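-- pv_equiv track=rewrite | github.com/AlexDotel/PythonTotal | pythonProject/venv/Dia 5/proyectodia5E2.py | deletrear
-- ===== SOURCE A (Python) =====
-- def deletrear(palabra):
--     lista = []
--     for l in palabra:
--         letra = l.lower()
--         if letra not in lista:
--             lista.append(letra)
--         else: pass
--     lista.sort()
--     return lista
-- ===== SOURCE B (Python) =====
-- def deletrear(palabra):
--     ordered = sorted(l.lower() for l in palabra)
--     lista = []
--     for letra in ordered:
--         if not lista or lista[-1] != letra:
--             lista.append(letra)
--     return lista
-- ===== Notes on version B (the rewrite author's own statement) =====
-- stated objective: alternative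
-- what changed: A dedups via a per-character linear membership scan on the growing list and sorts at the end; B sorts all lowercased characters first and removes duplicates in one adjacent-comparison pass.
import Mathlib
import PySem

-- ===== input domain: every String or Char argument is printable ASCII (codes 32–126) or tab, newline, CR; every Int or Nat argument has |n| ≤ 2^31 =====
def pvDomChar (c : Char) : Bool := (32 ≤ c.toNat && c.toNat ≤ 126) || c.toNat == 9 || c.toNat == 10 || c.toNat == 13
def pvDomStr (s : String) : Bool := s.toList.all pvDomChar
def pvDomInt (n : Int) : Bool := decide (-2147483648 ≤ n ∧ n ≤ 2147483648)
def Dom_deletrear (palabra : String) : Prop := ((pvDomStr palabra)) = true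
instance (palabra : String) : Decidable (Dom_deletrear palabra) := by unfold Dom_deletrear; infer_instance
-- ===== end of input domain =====

-- B replaces A's per-character membership scan by sort-then-adjacent-dedup; same result, alternative algorithm.

-- ===== PORT A =====
def deletrear (palabra : String) : List String :=
  let lista := palabra.toList.foldl (fun lista l =>
    let letra := PySem.Str.lower (String.singleton l)
    if letra ∉ lista then lista ++ [letra] else lista) []
  PySem.List.sorted lista (fun x => x) false

-- ===== PORT B =====
def deletrear_alt (palabra : String) : List String :=
  let ordered := PySem.List.sorted
    (palabra.toList.map (fun l => PySem.Str.lower (String.singleton l))) (fun x => x) false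
  ordered.foldl (fun lista letra =>
    if lista = [] ∨ lista.getLast? ≠ some letra then lista ++ [letra] else lista) []

-- ===== PRECONDITION & SPEC =====
def Spec_deletrear (palabra : String) (out : List String) : Prop := out = deletrear_alt palabra
instance (palabra : String) (out : List String) : Decidable (Spec_deletrear palabra out) := by unfold Spec_deletrear; infer_instance

-- ===== CLAIM (what is proved, stated in full; the proofs are below) =====
def Claim_equal_deletrear : Prop := ∀ (palabra : String), Dom_deletrear palabra → Spec_deletrear palabra (deletrear palabra)

-- ===== LEMMAS AND PROOFS =====

-- every element of a strictly increasing list is ≤ its last element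
theorem pv_le_getLast : ∀ (acc : List String), acc.Pairwise (· < ·) →
    ∀ m : String, acc.getLast? = some m → ∀ a ∈ acc, a ≤ m := by
  intro acc
  induction acc with
  | nil => intro _ m hm; simp at hm
  | cons x t ih =>
    intro h m hm a ha
    cases t with
    | nil =>
      simp at hm ha; simp [ha, hm]
    | cons y u =>
      rw [List.getLast?_cons_cons] at hm
      rcases List.mem_cons.mp ha with rfl | hat
      · have hx : ∀ b ∈ y :: u, a < b := (List.pairwise_cons.mp h).1
        exact le_of_lt (hx m (List.mem_of_getLast? hm))
      · exact ih (List.pairwise_cons.mp h).2 m hm a hat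

-- invariant of B's adjacent-dedup fold over a ≤-sorted list
theorem pv_adj (l : List String) : ∀ acc : List String,
    acc.Pairwise (· < ·) → l.Pairwise (· ≤ ·) → (∀ a ∈ acc, ∀ x ∈ l, a ≤ x) →
    (l.foldl (fun lista letra =>
        if lista = [] ∨ lista.getLast? ≠ some letra then lista ++ [letra] else lista) acc).Pairwise (· < ·) ∧
    ∀ x, x ∈ l.foldl (fun lista letra =>
        if lista = [] ∨ lista.getLast? ≠ some letra then lista ++ [letra] else lista) acc ↔ x ∈ acc ∨ x ∈ l := by
  induction l with
  | nil => intro acc h1 _ _; exact ⟨h1, by simp⟩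
  | cons c t ih =>
    intro acc h1 h2 h3
    have ht : t.Pairwise (· ≤ ·) := (List.pairwise_cons.mp h2).2
    have hct : ∀ x ∈ t, c ≤ x := (List.pairwise_cons.mp h2).1
    by_cases hc : acc = [] ∨ acc.getLast? ≠ some c
    · have hlt : ∀ a ∈ acc, a < c := by
        intro a ha
        rcases hc with rfl | hne
        · simp at ha
        · obtain ⟨m, hm⟩ : ∃ m, acc.getLast? = some m := by
            cases hacc : acc.getLast? with
            | none => rw [List.getLast?_eq_none_iff] at hacc; subst hacc; simp at ha
            | some m => exact ⟨m, rfl⟩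
          have ham : a ≤ m := pv_le_getLast acc h1 m hm a ha
          have hmc : m ≤ c := h3 m (List.mem_of_getLast? hm) c (List.mem_cons_self ..)
          have hne' : m ≠ c := fun hEq => hne (hEq ▸ hm)
          exact lt_of_le_of_lt ham (lt_of_le_of_ne hmc hne')
      have h1' : (acc ++ [c]).Pairwise (· < ·) := by
        rw [List.pairwise_append]
        exact ⟨h1, List.pairwise_singleton _ _, by simpa using hlt⟩
      have h3' : ∀ a ∈ acc ++ [c], ∀ x ∈ t, a ≤ x := by
        intro a ha x hx
        rcases List.mem_append.mp ha with ha | ha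
        · exact h3 a ha x (List.mem_cons_of_mem _ hx)
        · simp at ha; subst ha; exact hct x hx
      have hrec := ih (acc ++ [c]) h1' ht h3'
      rw [List.foldl_cons, if_pos hc]
      refine ⟨hrec.1, fun x => ?_⟩
      rw [hrec.2 x]
      simp [or_assoc, or_comm, or_left_comm]
    · rw [not_or, not_not] at hc
      have hcmem : c ∈ acc := List.mem_of_getLast? hc.2
      have h3' : ∀ a ∈ acc, ∀ x ∈ t, a ≤ x := fun a ha x hx =>
        h3 a ha x (List.mem_cons_of_mem _ hx)
      have hrec := ih acc h1 ht h3'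
      have hnc : ¬ (acc = [] ∨ acc.getLast? ≠ some c) := by
        rintro (h | h); exacts [hc.1 h, h hc.2]
      rw [List.foldl_cons, if_neg hnc]
      refine ⟨hrec.1, fun x => ?_⟩
      rw [hrec.2 x]
      constructor
      · rintro (h | h) <;> simp [h]
      · rintro (h | h)
        · exact Or.inl h
        · rcases List.mem_cons.mp h with rfl | h'
          · exact Or.inl hcmem
          · exact Or.inr h'

-- A's dedup loop is set(…) insertion, i.e. PySem.Set.ofList of the mapped list
theorem pv_foldA (f : Char → String) (xs : List Char) (acc : List String) :
    xs.foldl (fun lista l => if f l ∉ lista then lista ++ [f l] else lista) acc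
      = (xs.map f).foldl PySem.Set.add acc := by
  induction xs generalizing acc with
  | nil => rfl
  | cons x t ih =>
    simp only [List.foldl_cons, List.map_cons]
    rw [ih]
    congr 1
    by_cases h : f x ∈ acc
    · simp [PySem.Set.add, PySem.Set.contains, h]
    · simp [PySem.Set.add, PySem.Set.contains, h]

-- ===== VERDICT (by name: the statement is the Claim_ definition above) =====
theorem deletrear_spec : Claim_equal_deletrear := by
  intro palabra _
  unfold Spec_deletrear deletrear deletrear_alt
  set f : Char → String := fun l => PySem.Str.lower (String.singleton l) with hf
  set m : List String := palabra.toList.map f with hm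
  have hA : palabra.toList.foldl (fun lista l =>
      if f l ∉ lista then lista ++ [f l] else lista) [] = PySem.Set.ofList m := by
    rw [pv_foldA, PySem.Set.ofList_eq_foldl]
  have hsort : (PySem.List.sorted m (fun x => x) false).Pairwise (· ≤ ·) := by
    simpa using PySem.List.sorted_pairwise m (fun x => x)
  have hB := pv_adj (PySem.List.sorted m (fun x => x) false) [] (List.Pairwise.nil) hsort
    (by simp)
  set ys := (PySem.List.sorted m (fun x => x) false).foldl (fun lista letra =>
      if lista = [] ∨ lista.getLast? ≠ some letra then lista ++ [letra] else lista) [] with hys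
  have hmem : ∀ x, x ∈ ys ↔ x ∈ PySem.Set.ofList m := by
    intro x
    rw [hB.2 x]
    simp [PySem.List.mem_sorted, PySem.Set.mem_ofList]
  have hnodup : ys.Nodup := hB.1.imp ne_of_lt
  have hperm : ys.Perm (PySem.Set.ofList m) :=
    (List.perm_ext_iff_of_nodup hnodup (PySem.Set.nodup_ofList m)).mpr hmem
  have := PySem.List.sorted_eq_of_perm_of_pairwise_lt (xs := PySem.Set.ofList m)
    (key := fun x => x) (ys := ys) hperm (by simpa using hB.1)
  rw [hA, this]
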